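-- pv_equiv track=rewrite | github.com/BhaveshPatil1808/30_Days_30_Python_Projects | Day19_TypingSpeedTest.py | tperror
-- ===== SOURCE A (Python) =====
-- def tperror(prompt, inprompt):
--     prompt_words = prompt.split()
--     input_words = inprompt.split()
--     error = 0
--     for i in range(min(len(prompt_words), len(input_words))):
--         if prompt_words[i] != input_words[i]:
--             error += 1
--     # Count extra words typed or missed
--     error += abs(len(prompt_words) - len(input_words))
--     return error
-- ===== SOURCE B (Python) =====
-- def tperror(prompt, inprompt):
--     def go(a, b):
--         if not a:
--             return len(b)
--         if not b:
--             return len(a)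
--         return (a[0] != b[0]) + go(a[1:], b[1:])
--     return go(prompt.split(), inprompt.split())
-- ===== Notes on version B (the rewrite author's own statement) =====
-- stated objective: alternative
-- what changed: Replaces the indexed range(min) loop plus a separate abs(len difference) term by a single recursive paired traversal of the two word lists in which each leftover word contributes one error structurally.
import Mathlib
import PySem

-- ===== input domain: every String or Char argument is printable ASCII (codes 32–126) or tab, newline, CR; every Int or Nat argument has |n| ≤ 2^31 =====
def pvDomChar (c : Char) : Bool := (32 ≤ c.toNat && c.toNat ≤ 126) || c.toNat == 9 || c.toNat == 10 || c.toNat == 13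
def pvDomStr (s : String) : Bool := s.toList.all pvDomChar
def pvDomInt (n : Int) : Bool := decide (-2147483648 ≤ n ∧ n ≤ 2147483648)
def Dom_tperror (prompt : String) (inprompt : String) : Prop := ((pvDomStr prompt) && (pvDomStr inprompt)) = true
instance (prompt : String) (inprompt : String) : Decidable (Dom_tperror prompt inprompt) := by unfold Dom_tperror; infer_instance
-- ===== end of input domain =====

-- B replaces A's indexed range(min) loop plus abs length-difference term by one recursive
-- paired traversal of the word lists (alternative decomposition, same exact result).


-- ===== PORT A =====
def tperror (prompt : String) (inprompt : String) : Int :=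
  let prompt_words := PySem.Str.split₀ prompt
  let input_words := PySem.Str.split₀ inprompt
  let error : Int :=
    (PySem.List.pyRange 0 (min (prompt_words.length : Int) (input_words.length : Int)) 1).foldl
      (fun e i =>
        if PySem.List.pyGetD prompt_words i "" ≠ PySem.List.pyGetD input_words i "" then e + 1 else e)
      0
  error + ((prompt_words.length : Int) - (input_words.length : Int)).natAbs

-- ===== PORT B =====
-- recursive paired traversal: leftover words each count one error
def tperrorGo : List String → List String → Int
  | [], bs => (bs.length : Int)
  | a :: as, [] => ((a :: as).length : Int)
  | a :: as, b :: bs => (if a ≠ b then 1 else 0) + tperrorGo as bs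

def tperror_alt (prompt : String) (inprompt : String) : Int :=
  tperrorGo (PySem.Str.split₀ prompt) (PySem.Str.split₀ inprompt)

-- ===== PRECONDITION & SPEC =====
def Spec_tperror (prompt : String) (inprompt : String) (out : Int) : Prop := out = tperror_alt prompt inprompt
instance (prompt : String) (inprompt : String) (out : Int) : Decidable (Spec_tperror prompt inprompt out) := by unfold Spec_tperror; infer_instance

-- ===== CLAIM (what is proved, stated in full; the proofs are below) =====
def Claim_equal_tperror : Prop := ∀ (prompt : String) (inprompt : String), Dom_tperror prompt inprompt → Spec_tperror prompt inprompt (tperror prompt inprompt)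

-- ===== LEMMAS AND PROOFS =====

-- B's recursion equals mismatch count on the zip plus the length difference
theorem tperrorGo_eq (as : List String) : ∀ (bs : List String),
    tperrorGo as bs =
      ((as.zip bs).countP (fun p => decide (p.1 ≠ p.2)) : Int)
        + ((as.length : Int) - (bs.length : Int)).natAbs := by
  induction as with
  | nil => intro bs; simp [tperrorGo]
  | cons a as ih =>
    intro bs
    cases bs with
    | nil =>
      simp [tperrorGo]
      rw [abs_of_nonneg (by positivity)]
    | cons b bs =>
      simp only [tperrorGo, ih bs, List.zip_cons_cons, List.countP_cons, List.length_cons]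
      by_cases h : a = b <;> simp [h] <;> omega

theorem tperror_spec : Claim_equal_tperror := by
  intro prompt inprompt _
  unfold Spec_tperror tperror tperror_alt
  simp only []
  set as := PySem.Str.split₀ prompt with has
  set bs := PySem.Str.split₀ inprompt with hbs
  rw [tperrorGo_eq]
  have hmin : min ((as.length : Int)) ((bs.length : Int)) = ((as.zip bs).length : Int) := by
    simp [List.length_zip]
  rw [hmin]
  have hcongr :
      (PySem.List.pyRange 0 ((as.zip bs).length : Int) 1).foldl
        (fun e i =>
          if PySem.List.pyGetD as i "" ≠ PySem.List.pyGetD bs i "" then e + 1 else e) (0 : Int)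
      = (PySem.List.pyRange 0 ((as.zip bs).length : Int) 1).foldl
        (fun e i =>
          if (PySem.List.pyGetD (as.zip bs) i ("", "")).1 ≠ (PySem.List.pyGetD (as.zip bs) i ("", "")).2
          then e + 1 else e) (0 : Int) := by
    apply PySem.List.foldl_congr_mem
    intro acc i hi
    have hm := (PySem.List.mem_pyRange_one).1 hi
    obtain ⟨k, rfl⟩ : ∃ k : Nat, i = (k : Int) := ⟨i.toNat, by omega⟩
    have hlt : k < (as.zip bs).length := by omega
    have hlta : k < as.length := by simp [List.length_zip] at hlt; omega
    have hltb : k < bs.length := by simp [List.length_zip] at hlt; omega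
    have e1 : PySem.List.pyGetD as (k : Int) "" = as[k] := by
      rw [PySem.List.pyGetD_natCast]; simp [hlta]
    have e2 : PySem.List.pyGetD bs (k : Int) "" = bs[k] := by
      rw [PySem.List.pyGetD_natCast]; simp [hltb]
    have e3 : PySem.List.pyGetD (as.zip bs) (k : Int) ("", "") = (as[k], bs[k]) := by
      rw [PySem.List.pyGetD_natCast]
      simp [List.getD_eq_getElem?_getD, List.getElem?_eq_getElem hlt, List.getElem_zip]
    rw [e1, e2, e3]
  rw [hcongr]
  rw [PySem.List.foldl_pyRange_zero_pyGetD' (as.zip bs) ("", "")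
    (fun e p => if p.1 ≠ p.2 then e + 1 else e) 0]
  rw [PySem.List.foldl_ite_add_one]
  push_cast
  ring

-- ===== VERDICT (by name: the statement is the Claim_ definition above) =====
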